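-- pv_equiv track=rewrite | github.com/iCAS-Lab/bitmix | bitmix/utils/grouping.py | group_by_substrings
-- ===== SOURCE A (Python) =====
-- def group_by_substrings(alist, substrs):
--     groups = []
--     for substr_group in substrs:
--         groups.append([])
--     groups.append([])
--
--     for item in alist:
--         found=False
--         for i, substr_group in enumerate(substrs):
--             for substr in substr_group:
--                 if substr in item:
--                     groups[i].append(item)
--                     found=True
--                     break
--                 if found:
--                     break
--             if found:
--                 break
--         if not found:
--             groups[len(groups)-1].append(item)
--     return groups
-- ===== SOURCE B (Python) =====
-- def group_by_substrings(alist, substrs):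
--     # Group-major partition cascade: for each substring group, one pass splits the
--     # remaining items into this group's bucket and the rest; leftovers form the last bucket.
--     buckets = []
--     remaining = alist
--     for group in substrs:
--         matched = []
--         rest = []
--         for it in remaining:
--             for s in group:
--                 if s in it:
--                     matched.append(it)
--                     break
--             else:
--                 rest.append(it)
--         buckets.append(matched)
--         remaining = rest
--     buckets.append(remaining)
--     return buckets
-- ===== Notes on version B (the rewrite author's own statement) =====
-- stated objective: alternative
-- what changed: Replaces A's item-major triple loop with mutable indexed buckets and a found-flag by a group-major recursive partition cascade that filters the shrinking remainder once per group.
import Mathlib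
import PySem

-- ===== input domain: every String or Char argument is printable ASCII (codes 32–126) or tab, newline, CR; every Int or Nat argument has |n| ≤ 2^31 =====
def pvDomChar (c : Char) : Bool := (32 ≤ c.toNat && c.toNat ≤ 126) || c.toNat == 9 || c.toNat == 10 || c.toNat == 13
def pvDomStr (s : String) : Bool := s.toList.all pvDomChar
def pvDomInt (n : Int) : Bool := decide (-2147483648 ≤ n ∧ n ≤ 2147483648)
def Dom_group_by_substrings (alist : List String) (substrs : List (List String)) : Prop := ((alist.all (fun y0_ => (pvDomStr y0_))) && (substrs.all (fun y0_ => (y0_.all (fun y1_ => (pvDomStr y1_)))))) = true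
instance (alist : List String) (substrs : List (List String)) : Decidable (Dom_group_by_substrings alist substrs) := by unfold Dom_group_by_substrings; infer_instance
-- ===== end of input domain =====

-- B replaces A's item-major triple loop (mutable indexed buckets + found flag) by a
-- group-major recursive partition cascade; same cost, different structure (objective: alternative).

-- ===== PORT A =====
-- inner 'for substr in substr_group' loop: returns true at the 'break' after a hit
-- (the 'if found: break' inside this loop is unreachable: found is only set right before a break)
def pvInnerScan (item : String) : List String → Bool
  | [] => false
  | s :: rest => if PySem.Str.isIn s item then true else pvInnerScan item rest

-- 'for i, substr_group in enumerate(substrs)' loop: index of the group where the break fires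
def pvFindGroup (item : String) : List (Int × List String) → Option Int
  | [] => none
  | (i, g) :: rest => if pvInnerScan item g then some i else pvFindGroup item rest

def group_by_substrings (alist : List String) (substrs : List (List String)) : List (List String) :=
  -- groups = [[] for each substr_group] + [[]]
  let groups0 : List (List String) := substrs.map (fun _ => []) ++ [[]]
  -- for item in alist: append item to groups[i] at the first match, else to the last bucket
  alist.foldl (fun groups item =>
    match pvFindGroup item (PySem.List.enumerate substrs 0) with
    | some i => groups.modify i.toNat (fun b => b ++ [item])
    | none => groups.modify (groups.length - 1) (fun b => b ++ [item])) groups0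

-- ===== PORT B =====
def pvMatches (item : String) (g : List String) : Bool := g.any (fun s => PySem.Str.isIn s item)

-- 'for group in substrs' loop with state (buckets, remaining); the inner one-pass
-- split of remaining into matched/rest is List.partition; the inner 'for s in group'
-- scan with break is List.any (pvMatches)
def group_by_substrings_alt (alist : List String) (substrs : List (List String)) : List (List String) :=
  let p := substrs.foldl (fun (st : List (List String) × List String) g =>
      let pr := st.2.partition (fun it => pvMatches it g)
      (st.1 ++ [pr.1], pr.2)) ([], alist)
  p.1 ++ [p.2]

-- ===== PRECONDITION & SPEC =====
def Spec_group_by_substrings (alist : List String) (substrs : List (List String)) (out : List (List String)) : Prop := out = group_by_substrings_alt alist substrs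
instance (alist : List String) (substrs : List (List String)) (out : List (List String)) : Decidable (Spec_group_by_substrings alist substrs out) := by unfold Spec_group_by_substrings; infer_instance

-- ===== CLAIM (what is proved, stated in full; the proofs are below) =====
def Claim_equal_group_by_substrings : Prop := ∀ (alist : List String) (substrs : List (List String)), Dom_group_by_substrings alist substrs → Spec_group_by_substrings alist substrs (group_by_substrings alist substrs)

-- ===== LEMMAS AND PROOFS =====

-- proof-only recursive form of B's partition cascade
def pvCascade (alist : List String) : List (List String) → List (List String)
  | [] => [alist]
  | g :: gs =>
      (alist.filter (fun it => pvMatches it g)) ::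
        pvCascade (alist.filter (fun it => !pvMatches it g)) gs

-- index of the bucket item lands in (substrs.length = the catch-all bucket)
def pvBucketIdx (item : String) : List (List String) → Nat
  | [] => 0
  | g :: gs => if pvMatches item g then 0 else pvBucketIdx item gs + 1

lemma pvInnerScan_eq_matches (item : String) (g : List String) :
    pvInnerScan item g = pvMatches item g := by
  induction g with
  | nil => rfl
  | cons s rest ih => simp [pvInnerScan, pvMatches] at ih ⊢; rw [ih]

lemma pvBucketIdx_le (item : String) (gs : List (List String)) :
    pvBucketIdx item gs ≤ gs.length := by
  induction gs with
  | nil => simp [pvBucketIdx]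
  | cons g r ih => simp [pvBucketIdx]; split_ifs <;> omega

lemma pvFindGroup_enumerate (item : String) (gs : List (List String)) (s : Int) :
    pvFindGroup item (PySem.List.enumerate gs s) =
      if pvBucketIdx item gs < gs.length then some (s + pvBucketIdx item gs) else none := by
  induction gs generalizing s with
  | nil => simp [pvBucketIdx, PySem.List.enumerate_nil, pvFindGroup]
  | cons g r ih =>
      rw [PySem.List.enumerate_cons]
      simp only [pvFindGroup, pvInnerScan_eq_matches]
      by_cases h : pvMatches item g
      · simp [h, pvBucketIdx]
      · rw [if_neg (by simp [h]), ih]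
        have hb : pvBucketIdx item (g :: r) = pvBucketIdx item r + 1 := by
          simp [pvBucketIdx, h]
        by_cases h2 : pvBucketIdx item r < r.length
        · rw [if_pos h2, if_pos (by rw [hb]; simp; omega)]
          rw [hb]; congr 1; push_cast; ring
        · rw [if_neg h2, if_neg (by rw [hb]; simp; omega)]

lemma alt_length (alist : List String) (substrs : List (List String)) :
    (pvCascade alist substrs).length = substrs.length + 1 := by
  induction substrs generalizing alist with
  | nil => rfl
  | cons g gs ih => simp [pvCascade, ih]

lemma alt_nil (substrs : List (List String)) :
    pvCascade [] substrs = List.replicate (substrs.length + 1) [] := by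
  induction substrs with
  | nil => rfl
  | cons g gs ih => simp [pvCascade, ih, List.replicate_succ]

lemma alt_cons (x : String) (xs : List String) (substrs : List (List String)) :
    pvCascade (x :: xs) substrs =
      (pvCascade xs substrs).modify (pvBucketIdx x substrs) (fun b => x :: b) := by
  induction substrs generalizing xs with
  | nil => rfl
  | cons g gs ih =>
      by_cases h : pvMatches x g
      · simp [pvCascade, pvBucketIdx, h]
      · simp [pvCascade, pvBucketIdx, h, ih]

lemma zipWith_append_replicate_left (b : List (List String)) :
    List.zipWith (fun u v => u ++ v) (List.replicate b.length ([] : List String)) b = b := by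
  induction b with
  | nil => rfl
  | cons h t ih => simp [List.replicate_succ, ih]

lemma zipWith_append_replicate_right (b : List (List String)) :
    List.zipWith (fun u v => u ++ v) b (List.replicate b.length ([] : List String)) = b := by
  induction b with
  | nil => rfl
  | cons h t ih => simp [List.replicate_succ, ih]

lemma zipWith_append_modify (a b : List (List String)) (i : Nat) (x : String)
    (hi : i < a.length) (hab : a.length = b.length) :
    List.zipWith (fun u v => u ++ v) (a.modify i (fun c => c ++ [x])) b =
      List.zipWith (fun u v => u ++ v) a (b.modify i (fun c => x :: c)) := by
  induction a generalizing b i with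
  | nil => simp at hi
  | cons h t ih =>
      cases b with
      | nil => simp at hab
      | cons hb tb =>
          cases i with
          | zero => simp
          | succ j =>
              simp only [List.modify_succ_cons, List.zipWith_cons_cons]
              rw [ih tb j (by simpa using hi) (by simpa using hab)]

lemma main_loop (xs : List String) (substrs : List (List String)) (groups : List (List String))
    (hlen : groups.length = substrs.length + 1) :
    xs.foldl (fun groups item =>
      match pvFindGroup item (PySem.List.enumerate substrs 0) with
      | some i => groups.modify i.toNat (fun b => b ++ [item])
      | none => groups.modify (groups.length - 1) (fun b => b ++ [item])) groups =
    List.zipWith (fun u v => u ++ v) groups (pvCascade xs substrs) := by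
  induction xs generalizing groups with
  | nil =>
      simp only [List.foldl_nil, alt_nil, ← hlen]
      exact (zipWith_append_replicate_right groups).symm
  | cons x t ih =>
      rw [List.foldl_cons]
      have hb := pvBucketIdx_le x substrs
      have hstep : (match pvFindGroup x (PySem.List.enumerate substrs 0) with
          | some i => groups.modify i.toNat (fun b => b ++ [x])
          | none => groups.modify (groups.length - 1) (fun b => b ++ [x])) =
          groups.modify (pvBucketIdx x substrs) (fun b => b ++ [x]) := by
        rw [pvFindGroup_enumerate]
        by_cases h : pvBucketIdx x substrs < substrs.length
        · simp [h]
        · have : pvBucketIdx x substrs = substrs.length := by omega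
          simp [hlen, this]
      rw [hstep, ih _ (by simp [hlen]), alt_cons,
        zipWith_append_modify _ _ _ _ (by omega) (by rw [hlen, alt_length])]

-- ===== VERDICT (by name: the statement is the Claim_ definition above) =====
lemma alt_foldl_eq_cascade (substrs : List (List String)) (rem : List String)
    (acc : List (List String)) :
    (substrs.foldl (fun (st : List (List String) × List String) g =>
        let pr := st.2.partition (fun it => pvMatches it g)
        (st.1 ++ [pr.1], pr.2)) (acc, rem)).1 ++
      [(substrs.foldl (fun (st : List (List String) × List String) g =>
        let pr := st.2.partition (fun it => pvMatches it g)
        (st.1 ++ [pr.1], pr.2)) (acc, rem)).2] = acc ++ pvCascade rem substrs := by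
  induction substrs generalizing rem acc with
  | nil => simp [pvCascade]
  | cons g gs ih =>
      simp only [List.foldl_cons, List.partition_eq_filter_filter] at ih ⊢
      rw [ih]
      simp [pvCascade, Function.comp_def]

lemma alt_eq_cascade (alist : List String) (substrs : List (List String)) :
    group_by_substrings_alt alist substrs = pvCascade alist substrs := by
  simpa [group_by_substrings_alt] using alt_foldl_eq_cascade substrs alist []

theorem group_by_substrings_spec : Claim_equal_group_by_substrings := by
  intro alist substrs _
  unfold Spec_group_by_substrings group_by_substrings
  rw [alt_eq_cascade, main_loop _ _ _ (by simp)]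
  have hinit : (substrs.map (fun _ => ([] : List String)) ++ [[]]) =
      List.replicate (substrs.length + 1) [] := by
    rw [List.replicate_succ']
    congr 1
    simp
  rw [hinit, ← alt_length alist substrs, zipWith_append_replicate_left]
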